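-- pv_equiv track=rewrite | github.com/shiveshsky/datastructures | hashing/number_of_triangles.py | solve
-- ===== SOURCE A (Python) =====
-- from collections import Counter
--
-- def solve(A, B):
--     count_x = Counter(A)
--     count_y = Counter(B)
--     ans = 0
--     mod = 10 ** 9 + 7
--     for i in range(len(A)):
--         ans = (((count_x[A[i]] - 1) * (count_y[B[i]] - 1)) % mod + ans % mod) % mod
--     return ans
-- ===== SOURCE B (Python) =====
-- def solve(A, B):
--     # Counter-free: for each index i, count duplicate positions directly by scanning,
--     # since count_x[A[i]] - 1 == number of j != i with A[j] == A[i] (same for B).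
--     n = len(A)
--     ans = 0
--     for i in range(n):
--         dup_a = 0
--         for j in range(n):
--             if j != i and A[j] == A[i]:
--                 dup_a += 1
--         dup_b = 0
--         for k in range(len(B)):
--             if k != i and B[k] == B[i]:
--                 dup_b += 1
--         ans += dup_a * dup_b
--     return ans % (10 ** 9 + 7)
-- ===== Notes on version B (the rewrite author's own statement) =====
-- stated objective: alternative
-- what changed: B drops the Counter hash tables entirely and counts, for each index i, the duplicate positions j != i with A[j]==A[i] (and likewise for B) by direct scanning, summing dup_a*dup_b and reducing mod p once at the end; it trades A's O(n) hashing pass for a quadratic scan with no auxiliary data structure.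
import Mathlib
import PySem

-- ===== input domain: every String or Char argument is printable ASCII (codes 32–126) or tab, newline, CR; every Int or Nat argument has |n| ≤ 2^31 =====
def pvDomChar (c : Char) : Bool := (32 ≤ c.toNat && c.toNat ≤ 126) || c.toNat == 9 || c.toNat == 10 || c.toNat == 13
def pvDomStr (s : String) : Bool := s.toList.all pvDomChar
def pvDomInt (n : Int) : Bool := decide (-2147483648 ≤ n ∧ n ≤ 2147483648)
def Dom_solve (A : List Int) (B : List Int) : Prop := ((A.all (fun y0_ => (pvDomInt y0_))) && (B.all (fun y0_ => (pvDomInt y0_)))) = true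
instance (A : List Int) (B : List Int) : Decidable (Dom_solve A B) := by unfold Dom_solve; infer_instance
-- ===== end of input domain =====

-- B replaces A's Counter hash tables by a direct per-index duplicate scan (alternative decomposition, no auxiliary data structure); equivalence is proved on inputs with len(A) ≤ len(B).

-- ===== PORT A =====
-- literal port of A: Counters over A and B, per-index loop, mod applied at every step
def solve (A : List Int) (B : List Int) : Int :=
  let count_x := PySem.Dict.counter A
  let count_y := PySem.Dict.counter B
  let md : Int := 10 ^ 9 + 7
  (PySem.List.pyRange 0 A.length 1).foldl (fun ans i =>
    PySem.Int.mod
      (PySem.Int.mod ((count_x.getD (PySem.List.pyGetD A i 0) 0 - 1) *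
                      (count_y.getD (PySem.List.pyGetD B i 0) 0 - 1)) md
        + PySem.Int.mod ans md) md) 0

-- ===== PORT B =====
-- port of B: no Counter; for each i scan all positions j ≠ i (resp. k ≠ i) counting duplicates, mod once at the end
def solve_alt (A : List Int) (B : List Int) : Int :=
  let n : Int := A.length
  let ans := (PySem.List.pyRange 0 n 1).foldl (fun ans i =>
    let dup_a := (PySem.List.pyRange 0 n 1).foldl (fun acc j =>
        if j ≠ i ∧ PySem.List.pyGetD A j 0 = PySem.List.pyGetD A i 0 then acc + 1 else acc) 0
    let dup_b := (PySem.List.pyRange 0 (B.length : Int) 1).foldl (fun acc k =>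
        if k ≠ i ∧ PySem.List.pyGetD B k 0 = PySem.List.pyGetD B i 0 then acc + 1 else acc) 0
    ans + dup_a * dup_b) 0
  PySem.Int.mod ans (10 ^ 9 + 7)

-- ===== PRECONDITION & SPEC =====
-- A raises IndexError at B[i] when len(B) < len(A); Pre_ excludes exactly those inputs.
def Pre_solve (A : List Int) (B : List Int) : Prop := A.length ≤ B.length
instance (A : List Int) (B : List Int) : Decidable (Pre_solve A B) := by unfold Pre_solve; infer_instance
def pvWitness_solve : List Int × List Int := ([1, 1, 2], [3, 3, 4])
def Spec_solve (A : List Int) (B : List Int) (out : Int) : Prop := out = solve_alt A B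
instance (A : List Int) (B : List Int) (out : Int) : Decidable (Spec_solve A B out) := by unfold Spec_solve; infer_instance

-- ===== CLAIM (what is proved, stated in full; the proofs are below) =====
def Claim_equal_solve : Prop := ∀ (A : List Int) (B : List Int), Dom_solve A B → Pre_solve A B → Spec_solve A B (solve A B)

-- ===== LEMMAS AND PROOFS =====

-- removing the (true) position i itself from a duplicate-free index list lowers the count by one
theorem countP_erase_self (l : List Nat) (hl : l.Nodup) (i : Nat) (hi : i ∈ l) (p : Nat → Bool) (hpi : p i = true) :
    l.countP p = l.countP (fun j => (j ≠ i) && p j) + 1 := by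
  induction l with
  | nil => simp at hi
  | cons a t ih =>
    simp only [List.nodup_cons] at hl
    rcases List.mem_cons.mp hi with h | h
    · subst h
      have ht : t.countP (fun j => (j ≠ i) && p j) = t.countP p := by
        apply List.countP_congr; intro x hx
        have hxa : x ≠ i := fun e => hl.1 (e ▸ hx)
        simp [hxa]
      simp [hpi]
      simpa using ht.symm
    · have hrec := ih hl.2 h
      have hai : a ≠ i := fun e => hl.1 (e ▸ h)
      by_cases ha : p a = true
      · simp [ha, hai, hrec]
      · simp only [Bool.not_eq_true] at ha
        simp [ha, hai, hrec]

theorem map_getD_range (l : List Int) : (List.range l.length).map (fun j => l.getD j 0) = l := by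
  apply List.ext_getElem
  · simp
  · intro k h1 h2
    simp [List.getD_eq_getElem?_getD, h2]

-- B's inner scan at position i counts exactly (count of l[i] in l) - 1
theorem dup_count (l : List Int) (i : Nat) (hi : i < l.length) :
    (((PySem.List.pyRange 0 (l.length : Int) 1).countP
        (fun j => decide ((j ≠ (i : Int)) ∧ PySem.List.pyGetD l j 0 = PySem.List.pyGetD l (i : Int) 0)) : Nat) : Int)
      = (l.count (PySem.List.pyGetD l (i : Int) 0) : Int) - 1 := by
  have hgi : PySem.List.pyGetD l (i : Int) 0 = l.getD i 0 := PySem.List.pyGetD_natCast l i 0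
  rw [hgi, PySem.List.pyRange_zero_natCast, List.countP_map]
  have hpred : ((fun j => decide ((j ≠ (i : Int)) ∧ PySem.List.pyGetD l j 0 = l.getD i 0)) ∘ (fun j : Nat => (j : Int)))
      = (fun j : Nat => (j ≠ i) && decide (l.getD j 0 = l.getD i 0)) := by
    funext j
    simp [Function.comp, PySem.List.pyGetD_natCast]
  rw [hpred]
  have hcnt : ∀ x : Int, (List.range l.length).countP (fun j => decide (l.getD j 0 = x)) = l.count x := by
    intro x
    rw [List.count_eq_countP]
    conv_rhs => rw [← map_getD_range l]
    rw [List.countP_map]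
    apply List.countP_congr
    intro a _
    simp [Function.comp, beq_iff_eq]
  have hpi : (fun j => decide (l.getD j 0 = l.getD i 0)) i = true := by simp
  have := countP_erase_self (List.range l.length) (List.nodup_range) i (List.mem_range.mpr hi)
    (fun j => decide (l.getD j 0 = l.getD i 0)) hpi
  simp only [] at this
  rw [hcnt (l.getD i 0)] at this
  omega

-- A's loop: step-wise mod-reduced accumulation equals the plain sum reduced once
theorem loopA (g : Int → Int) (p : Int) (hp : 0 < p) (n : Nat) :
    (PySem.List.pyRange 0 n 1).foldl (fun ans i =>
      PySem.Int.mod (PySem.Int.mod (g i) p + PySem.Int.mod ans p) p) 0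
    = ((PySem.List.pyRange 0 n 1).map g).sum % p := by
  induction n with
  | zero => simp [PySem.List.pyRange]
  | succ n ih =>
    have hcast : ((n + 1 : Nat) : Int) = (n : Int) + 1 := by push_cast; ring
    rw [hcast, PySem.List.pyRange_one_succ_right (by positivity)]
    rw [List.foldl_append, List.map_append, List.sum_append, ih]
    simp only [List.foldl_cons, List.foldl_nil, List.map_cons, List.map_nil, List.sum_cons,
      List.sum_nil, add_zero]
    rw [PySem.Int.mod_eq_emod_of_pos hp, PySem.Int.mod_eq_emod_of_pos hp,
      PySem.Int.mod_eq_emod_of_pos hp, Int.emod_emod_of_dvd _ dvd_rfl]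
    conv_rhs => rw [Int.add_emod]
    ring_nf

-- ===== VERDICT (by name: the statement is the Claim_ definition above) =====
theorem solve_spec : Claim_equal_solve := by
  intro A B _ hpre
  unfold Pre_solve at hpre
  unfold Spec_solve solve solve_alt
  have hp : (0 : Int) < 10 ^ 9 + 7 := by norm_num
  simp only [PySem.Dict.getD_counter]
  rw [loopA (fun i => ((List.count (PySem.List.pyGetD A i 0) A : Int) - 1) *
        ((List.count (PySem.List.pyGetD B i 0) B : Int) - 1)) _ hp A.length]
  simp only [PySem.List.foldl_ite_add_one, PySem.List.foldl_add]
  rw [PySem.Int.mod_eq_emod_of_pos hp]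
  simp only [zero_add]
  congr 1
  refine congrArg (List.sum : List Int → Int) (List.map_congr_left ?_)
  intro i hi
  obtain ⟨h0, hn⟩ := (PySem.List.mem_pyRange_one).mp hi
  obtain ⟨k, rfl⟩ : ∃ k : Nat, i = (k : Int) := ⟨i.toNat, (Int.toNat_of_nonneg h0).symm⟩
  have hkA : k < A.length := by exact_mod_cast hn
  have hkB : k < B.length := lt_of_lt_of_le hkA hpre
  have hA := dup_count A k hkA
  have hB := dup_count B k hkB
  rw [← hA, ← hB]
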